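-- pv_equiv track=rewrite | github.com/salchaD-27/problemSolving_alsoDA | LeetCode/2088_H_Count_Fertile_Pyramid_In_A_Lands.py | pyramidHeights
-- ===== SOURCE A (Python) =====
-- def pyramidHeights(m, n, grid):
--     max_pyramid_heights = [[0] * n for _ in range(m)]
--     for i in range(m-1, -1, -1):
--         for j in range(n):
--             if grid[i][j] == 1:
--                 if i == m-1: max_pyramid_heights[i][j] = 1
--                 else:
--                     max_pyramid_heights[i][j] = 1 + min(
--                         max_pyramid_heights[i + 1][j - 1] if j - 1 >= 0 else 0,
--                         max_pyramid_heights[i + 1][j],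
--                         max_pyramid_heights[i + 1][j + 1] if j + 1 < n else 0
--                     )
--     return max_pyramid_heights
-- ===== SOURCE B (Python) =====
-- def pyramidHeights(m, n, grid):
--     memo = {}
--
--     def height(i, j):
--         if (i, j) in memo:
--             return memo[(i, j)]
--         if grid[i][j] != 1:
--             v = 0
--         elif i == m - 1:
--             v = 1
--         else:
--             v = 1 + min(height(i + 1, j - 1) if j - 1 >= 0 else 0,
--                         height(i + 1, j),
--                         height(i + 1, j + 1) if j + 1 < n else 0)
--         memo[(i, j)] = v
--         return v
--
--     return [[height(i, j) for j in range(n)] for i in range(m)]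
-- ===== Notes on version B (the rewrite author's own statement) =====
-- stated objective: alternative
-- what changed: Replaces the bottom-up in-place DP table (reverse row loop writing into a preallocated m-by-n grid) by a top-down recursive helper height(i,j) with a memo dictionary, called cell by cell to build the result rows.
import Mathlib
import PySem

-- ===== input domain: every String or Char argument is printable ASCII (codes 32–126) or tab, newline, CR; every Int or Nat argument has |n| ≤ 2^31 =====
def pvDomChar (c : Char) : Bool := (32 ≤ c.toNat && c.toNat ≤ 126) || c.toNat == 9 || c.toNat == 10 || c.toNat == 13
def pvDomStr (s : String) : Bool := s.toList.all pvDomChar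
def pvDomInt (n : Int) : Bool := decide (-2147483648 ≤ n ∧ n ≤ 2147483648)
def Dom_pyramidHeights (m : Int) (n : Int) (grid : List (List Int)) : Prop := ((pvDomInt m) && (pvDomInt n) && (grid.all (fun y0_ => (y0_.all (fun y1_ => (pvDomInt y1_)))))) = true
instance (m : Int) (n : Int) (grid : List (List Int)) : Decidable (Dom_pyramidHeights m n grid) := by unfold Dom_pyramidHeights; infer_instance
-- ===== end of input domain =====

-- B replaces A's bottom-up in-place DP table (reverse row loop writing into a
-- preallocated m×n grid) by a top-down recursive helper height(i,j) with a memo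
-- dictionary, called cell by cell (objective: alternative; same asymptotic cost).

-- ===== PORT A =====
def pvSetCell (t : List (List Int)) (i j : Int) (v : Int) : List (List Int) :=
  t.set i.toNat ((t.getD i.toNat []).set j.toNat v)
def pvGetCell (t : List (List Int)) (i j : Int) : Int :=
  (t.getD i.toNat []).getD j.toNat 0

def pyramidHeights (m : Int) (n : Int) (grid : List (List Int)) : List (List Int) :=
  let init := List.replicate m.toNat (List.replicate n.toNat 0)
  (PySem.List.pyRange (m - 1) (-1) (-1)).foldl
    (fun dp i =>
      (PySem.List.pyRange 0 n 1).foldl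
        (fun dp j =>
          if ((PySem.List.pyGet? grid i).bind (fun r => PySem.List.pyGet? r j)) = some 1 then
            if i = m - 1 then pvSetCell dp i j 1
            else
              pvSetCell dp i j (1 + min
                (if j - 1 ≥ 0 then pvGetCell dp (i + 1) (j - 1) else 0)
                (min (pvGetCell dp (i + 1) j)
                  (if j + 1 < n then pvGetCell dp (i + 1) (j + 1) else 0)))
          else dp)
        dp)
    init

-- ===== PORT B =====
-- memoized top-down recursion; the Nat fuel only makes the recursion structurally
-- terminating (it is never exhausted on the calls B makes, which have i ≤ m-1)
def heightB (m : Int) (n : Int) (grid : List (List Int)) :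
    Nat → PySem.Dict (Int × Int) Int → Int → Int → Int × PySem.Dict (Int × Int) Int
  | 0, memo, _, _ => (0, memo)
  | Nat.succ k, memo, i, j =>
    match PySem.Dict.get? memo (i, j) with
    | some v => (v, memo)
    | none =>
      let vm : Int × PySem.Dict (Int × Int) Int :=
        if ¬ (((PySem.List.pyGet? grid i).bind (fun r => PySem.List.pyGet? r j)) = some 1) then
          (0, memo)
        else if i = m - 1 then (1, memo)
        else
          let am := if j - 1 ≥ 0 then heightB m n grid k memo (i + 1) (j - 1) else (0, memo)
          let bm := heightB m n grid k am.2 (i + 1) j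
          let cm := if j + 1 < n then heightB m n grid k bm.2 (i + 1) (j + 1) else (0, bm.2)
          (1 + min am.1 (min bm.1 cm.1), cm.2)
      (vm.1, PySem.Dict.insert vm.2 (i, j) vm.1)

def pyramidHeights_alt (m : Int) (n : Int) (grid : List (List Int)) : List (List Int) :=
  ((PySem.List.pyRange 0 m 1).foldl
    (fun (st : List (List Int) × PySem.Dict (Int × Int) Int) i =>
      let row := (PySem.List.pyRange 0 n 1).foldl
        (fun (st2 : List Int × PySem.Dict (Int × Int) Int) j =>
          let vm := heightB m n grid m.toNat st2.2 i j
          (st2.1 ++ [vm.1], vm.2)) ([], st.2)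
      (st.1 ++ [row.1], row.2))
    ([], PySem.Dict.empty)).1

-- ===== PRECONDITION & SPEC =====
-- Pre_ excludes exactly the inputs on which Source A raises IndexError: n > 0 with fewer
-- than m grid rows, or a row among the first m shorter than n (B raises there too).
def Pre_pyramidHeights (m : Int) (n : Int) (grid : List (List Int)) : Prop :=
  0 < n → (m.toNat ≤ grid.length ∧ ∀ row ∈ grid.take m.toNat, n ≤ (row.length : Int))
instance (m : Int) (n : Int) (grid : List (List Int)) : Decidable (Pre_pyramidHeights m n grid) := by
  unfold Pre_pyramidHeights; infer_instance

def pvWitness_pyramidHeights : Int × Int × List (List Int) := (3, 3, [[1,1,1],[1,1,1],[0,1,0]])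

def Spec_pyramidHeights (m : Int) (n : Int) (grid : List (List Int)) (out : List (List Int)) : Prop := out = pyramidHeights_alt m n grid
instance (m : Int) (n : Int) (grid : List (List Int)) (out : List (List Int)) : Decidable (Spec_pyramidHeights m n grid out) := by unfold Spec_pyramidHeights; infer_instance

-- ===== CLAIM (what is proved, stated in full; the proofs are below) =====
def Claim_equal_pyramidHeights : Prop := ∀ (m : Int) (n : Int) (grid : List (List Int)), Dom_pyramidHeights m n grid → Pre_pyramidHeights m n grid → Spec_pyramidHeights m n grid (pyramidHeights m n grid)

-- ===== LEMMAS AND PROOFS =====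

-- the pure height function (B's recursion without the memo), with the same fuel
def gA (grid : List (List Int)) (i j : Int) : Option Int :=
  (PySem.List.pyGet? grid i).bind (fun r => PySem.List.pyGet? r j)

def Hfuel (m n : Int) (grid : List (List Int)) : Nat → Int → Int → Int
  | 0, _, _ => 0
  | Nat.succ k, i, j =>
    if ¬ (gA grid i j = some 1) then 0
    else if i = m - 1 then 1
    else 1 + min (if j - 1 ≥ 0 then Hfuel m n grid k (i + 1) (j - 1) else 0)
           (min (Hfuel m n grid k (i + 1) j)
             (if j + 1 < n then Hfuel m n grid k (i + 1) (j + 1) else 0))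

def Hh (m n : Int) (grid : List (List Int)) (i j : Int) : Int :=
  Hfuel m n grid ((m - 1 - i).toNat + 1) i j

lemma Hh_unfold (m n : Int) (grid : List (List Int)) (i j : Int) (hi : i ≤ m - 1) :
    Hh m n grid i j =
      if ¬ (gA grid i j = some 1) then 0
      else if i = m - 1 then 1
      else 1 + min (if j - 1 ≥ 0 then Hh m n grid (i + 1) (j - 1) else 0)
             (min (Hh m n grid (i + 1) j)
               (if j + 1 < n then Hh m n grid (i + 1) (j + 1) else 0)) := by
  by_cases hg : gA grid i j = some 1
  · by_cases him : i = m - 1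
    · simp [Hh, Hfuel, him]
    · have h1 : (m - 1 - i).toNat = (m - 1 - (i + 1)).toNat + 1 := by omega
      simp only [Hh, h1, Hfuel, hg, him]
  · simp [Hh, Hfuel, hg]

def InvM (m n : Int) (grid : List (List Int)) (memo : PySem.Dict (Int × Int) Int) : Prop :=
  ∀ p v, PySem.Dict.get? memo p = some v → v = Hh m n grid p.1 p.2

lemma InvM_empty (m n : Int) (grid : List (List Int)) : InvM m n grid PySem.Dict.empty := by
  intro p v h
  simp [PySem.Dict.get?_empty] at h

lemma heightB_correct (m n : Int) (grid : List (List Int)) :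
    ∀ (fuel : Nat) (i j : Int) (memo : PySem.Dict (Int × Int) Int),
      InvM m n grid memo → i ≤ m - 1 → (m - 1 - i).toNat < fuel →
      (heightB m n grid fuel memo i j).1 = Hh m n grid i j ∧
      InvM m n grid (heightB m n grid fuel memo i j).2 := by
  intro fuel
  induction fuel with
  | zero => intro i j memo _ _ hf; omega
  | succ k ih =>
    intro i j memo hInv hi hf
    rcases hmem : PySem.Dict.get? memo (i, j) with _ | v
    · -- memo miss
      have hIns : ∀ (v : Int) (d : PySem.Dict (Int × Int) Int),
          InvM m n grid d → v = Hh m n grid i j →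
          InvM m n grid (PySem.Dict.insert d (i, j) v) := by
        intro v d hd hv p w hw
        rw [PySem.Dict.get?_insert] at hw
        by_cases hp : p = (i, j)
        · rw [if_pos hp] at hw
          cases hw
          rw [hp, hv]
        · rw [if_neg hp] at hw
          exact hd p w hw
      by_cases hg : gA grid i j = some 1
      · by_cases him : i = m - 1
        · have hg' : ((PySem.List.pyGet? grid i).bind (fun r => PySem.List.pyGet? r j)) = some 1 := hg
          have hval : Hh m n grid i j = 1 := by
            rw [Hh_unfold m n grid i j hi, if_neg (not_not_intro hg), if_pos him]
          have hres : heightB m n grid (Nat.succ k) memo i j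
              = (1, PySem.Dict.insert memo (i, j) 1) := by
            simp only [heightB, hmem]
            rw [if_neg (not_not_intro hg'), if_pos him]
          rw [hres]
          exact ⟨hval.symm, hIns 1 memo hInv hval.symm⟩
        · -- recursive case
          have hg' : ((PySem.List.pyGet? grid i).bind (fun r => PySem.List.pyGet? r j)) = some 1 := hg
          have hlt : i < m - 1 := by omega
          have hfk : (m - 1 - (i + 1)).toNat < k := by omega
          have hi1 : i + 1 ≤ m - 1 := by omega
          have Ha : (if j - 1 ≥ 0 then heightB m n grid k memo (i + 1) (j - 1) else (0, memo)).1
                  = (if j - 1 ≥ 0 then Hh m n grid (i + 1) (j - 1) else 0) ∧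
                InvM m n grid (if j - 1 ≥ 0 then heightB m n grid k memo (i + 1) (j - 1) else (0, memo)).2 := by
            by_cases h : j - 1 ≥ 0
            · simp only [if_pos h]; exact ih (i + 1) (j - 1) memo hInv hi1 hfk
            · simp only [if_neg h]; exact ⟨by trivial, hInv⟩
          set am := (if j - 1 ≥ 0 then heightB m n grid k memo (i + 1) (j - 1) else (0, memo)) with ham
          have Hb := ih (i + 1) j am.2 Ha.2 hi1 hfk
          set bm := heightB m n grid k am.2 (i + 1) j with hbm
          have Hc : (if j + 1 < n then heightB m n grid k bm.2 (i + 1) (j + 1) else (0, bm.2)).1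
                  = (if j + 1 < n then Hh m n grid (i + 1) (j + 1) else 0) ∧
                InvM m n grid (if j + 1 < n then heightB m n grid k bm.2 (i + 1) (j + 1) else (0, bm.2)).2 := by
            by_cases h : j + 1 < n
            · simp only [if_pos h]; exact ih (i + 1) (j + 1) bm.2 Hb.2 hi1 hfk
            · simp only [if_neg h]; exact ⟨by trivial, Hb.2⟩
          set cm := (if j + 1 < n then heightB m n grid k bm.2 (i + 1) (j + 1) else (0, bm.2)) with hcm
          have hval : 1 + min am.1 (min bm.1 cm.1) = Hh m n grid i j := by
            rw [Hh_unfold m n grid i j hi]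
            rw [if_neg (not_not_intro hg), if_neg him, Ha.1, Hb.1, Hc.1]
          have hres : heightB m n grid (Nat.succ k) memo i j
              = (1 + min am.1 (min bm.1 cm.1),
                 PySem.Dict.insert cm.2 (i, j) (1 + min am.1 (min bm.1 cm.1))) := by
            rw [hcm, hbm, ham]
            simp only [heightB, hmem]
            rw [if_neg (not_not_intro hg'), if_neg him]
          rw [hres]
          exact ⟨hval, hIns _ _ Hc.2 hval⟩
      · have hval : Hh m n grid i j = 0 := by
          rw [Hh_unfold m n grid i j hi]
          rw [if_pos hg]
        have hg' : ¬ (((PySem.List.pyGet? grid i).bind (fun r => PySem.List.pyGet? r j)) = some 1) := hg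
        have hres : heightB m n grid (Nat.succ k) memo i j
            = (0, PySem.Dict.insert memo (i, j) 0) := by
          simp only [heightB, hmem]
          rw [if_pos hg']
        rw [hres]
        exact ⟨hval.symm, hIns 0 memo hInv hval.symm⟩
    · -- memo hit
      have hres : heightB m n grid (Nat.succ k) memo i j = (v, memo) := by
        simp only [heightB, hmem]
      rw [hres]
      exact ⟨hInv (i, j) v hmem, hInv⟩

-- generic threaded-state fold
lemma fold_thread {σ β : Type} (Inv : σ → Prop) (P : Int → Prop) (g : Int → β)
    (f : σ → Int → β × σ)
    (hstep : ∀ s x, Inv s → P x → (f s x).1 = g x ∧ Inv (f s x).2) :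
    ∀ (xs : List Int) (acc : List β) (s : σ), (∀ x ∈ xs, P x) → Inv s →
      (xs.foldl (fun st x => (st.1 ++ [(f st.2 x).1], (f st.2 x).2)) (acc, s)).1
        = acc ++ xs.map g ∧
      Inv (xs.foldl (fun st x => (st.1 ++ [(f st.2 x).1], (f st.2 x).2)) (acc, s)).2 := by
  intro xs
  induction xs with
  | nil => intro acc s _ hs; exact ⟨by simp, hs⟩
  | cons x xs ih =>
    intro acc s hP hs
    have hx := hstep s x hs (hP x (by simp))
    simp only [List.foldl_cons]
    have := ih (acc ++ [(f s x).1]) (f s x).2 (fun y hy => hP y (by simp [hy])) hx.2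
    refine ⟨?_, this.2⟩
    rw [this.1, hx.1]
    simp

lemma B_eq_target (m n : Int) (grid : List (List Int)) :
    pyramidHeights_alt m n grid
      = (PySem.List.pyRange 0 m 1).map
          (fun i => (PySem.List.pyRange 0 n 1).map (Hh m n grid i)) := by
  have hfuel : ∀ i : Int, 0 ≤ i → i ≤ m - 1 → (m - 1 - i).toNat < m.toNat := by
    intro i h0 h1; omega
  have inner : ∀ (i : Int), 0 ≤ i → i ≤ m - 1 → ∀ (s : PySem.Dict (Int × Int) Int),
      InvM m n grid s →
      ((PySem.List.pyRange 0 n 1).foldl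
        (fun (st2 : List Int × PySem.Dict (Int × Int) Int) j =>
          (st2.1 ++ [(heightB m n grid m.toNat st2.2 i j).1],
           (heightB m n grid m.toNat st2.2 i j).2)) ([], s)).1
        = (PySem.List.pyRange 0 n 1).map (Hh m n grid i) ∧
      InvM m n grid ((PySem.List.pyRange 0 n 1).foldl
        (fun (st2 : List Int × PySem.Dict (Int × Int) Int) j =>
          (st2.1 ++ [(heightB m n grid m.toNat st2.2 i j).1],
           (heightB m n grid m.toNat st2.2 i j).2)) ([], s)).2 := by
    intro i h0 h1 s hs
    have := fold_thread (InvM m n grid) (fun _ => True) (Hh m n grid i)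
      (fun s j => heightB m n grid m.toNat s i j)
      (fun s j hsj _ => heightB_correct m n grid m.toNat i j s hsj h1 (hfuel i h0 h1))
      (PySem.List.pyRange 0 n 1) [] s (fun _ _ => trivial) hs
    simpa using this
  have outer := fold_thread (InvM m n grid) (fun i => 0 ≤ i ∧ i ≤ m - 1)
    (fun i => (PySem.List.pyRange 0 n 1).map (Hh m n grid i))
    (fun s i => ((PySem.List.pyRange 0 n 1).foldl
        (fun (st2 : List Int × PySem.Dict (Int × Int) Int) j =>
          (st2.1 ++ [(heightB m n grid m.toNat st2.2 i j).1],
           (heightB m n grid m.toNat st2.2 i j).2)) ([], s)))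
    (fun s i hsi hPi => inner i hPi.1 hPi.2 s hsi)
    (PySem.List.pyRange 0 m 1) [] PySem.Dict.empty
    (fun x hx => by
      rw [PySem.List.mem_pyRange_one] at hx
      exact ⟨hx.1, by omega⟩)
    (InvM_empty m n grid)
  show ((PySem.List.pyRange 0 m 1).foldl
      (fun (st : List (List Int) × PySem.Dict (Int × Int) Int) i =>
        (st.1 ++ [((PySem.List.pyRange 0 n 1).foldl
            (fun (st2 : List Int × PySem.Dict (Int × Int) Int) j =>
              (st2.1 ++ [(heightB m n grid m.toNat st2.2 i j).1],
               (heightB m n grid m.toNat st2.2 i j).2)) ([], st.2)).1],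
         ((PySem.List.pyRange 0 n 1).foldl
            (fun (st2 : List Int × PySem.Dict (Int × Int) Int) j =>
              (st2.1 ++ [(heightB m n grid m.toNat st2.2 i j).1],
               (heightB m n grid m.toNat st2.2 i j).2)) ([], st.2)).2))
      ([], PySem.Dict.empty)).1 = _
  rw [outer.1]
  simp

-- ============ A-side: A equals the same target, via the rolling-row fold ============

def zr (n : Int) : List Int := List.replicate n.toNat 0

def compRow (g below : List Int) : List Int :=
  (g.zip ((0 :: below.dropLast).zip (below.zip (below.drop 1 ++ [0])))).map
    (fun p => if p.1 = 1 then 1 + min p.2.1 (min p.2.2.1 p.2.2.2) else 0)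

def stepAin (m n : Int) (grid : List (List Int)) (i : Int) (dp : List (List Int)) (j : Int) : List (List Int) :=
  if ((PySem.List.pyGet? grid i).bind (fun r => PySem.List.pyGet? r j)) = some 1 then
    if i = m - 1 then pvSetCell dp i j 1
    else
      pvSetCell dp i j (1 + min
        (if j - 1 ≥ 0 then pvGetCell dp (i + 1) (j - 1) else 0)
        (min (pvGetCell dp (i + 1) j)
          (if j + 1 < n then pvGetCell dp (i + 1) (j + 1) else 0)))
  else dp

def stepA (m n : Int) (grid : List (List Int)) (dp : List (List Int)) (i : Int) : List (List Int) :=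
  (PySem.List.pyRange 0 n 1).foldl (stepAin m n grid i) dp

def stepB (grid : List (List Int)) (st : List (List Int) × List Int) (i : Int) : List (List Int) × List Int :=
  (st.1 ++ [compRow ((PySem.List.pyGet? grid i).getD []) st.2],
   compRow ((PySem.List.pyGet? grid i).getD []) st.2)

lemma A_eq_fold (m n : Int) (grid : List (List Int)) :
    pyramidHeights m n grid
      = (PySem.List.pyRange (m-1) (-1) (-1)).foldl (stepA m n grid) (List.replicate m.toNat (zr n)) := rfl

lemma length_compRow (g below : List Int) :
    (compRow g below).length = min g.length below.length := by
  simp [compRow]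
  omega

lemma getD_compRow (g below : List Int) (b : Nat) (hg : b < g.length) (hb : b < below.length) :
    (compRow g below).getD b 0 =
      if g.getD b 0 = 1 then
        1 + min (if b = 0 then 0 else below.getD (b-1) 0)
            (min (below.getD b 0) (below.getD (b+1) 0))
      else 0 := by
  have hlen : b < (compRow g below).length := by rw [length_compRow]; omega
  rw [List.getD_eq_getElem _ _ hlen, List.getD_eq_getElem _ _ hg, List.getD_eq_getElem _ _ hb]
  simp only [compRow, List.getElem_map, List.getElem_zip]
  have hleft : (0 :: below.dropLast)[b]'(by simp; omega) = (if b = 0 then 0 else below.getD (b-1) 0) := by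
    rcases b with _ | k
    · simp
    · simp only [List.getElem_cons_succ, List.getElem_dropLast, if_neg (Nat.succ_ne_zero k)]
      simpa using (List.getD_eq_getElem below 0 (by omega : k + 1 - 1 < below.length)).symm
  have hright : (List.drop 1 below ++ [0])[b]'(by simp; omega) = below.getD (b+1) 0 := by
    by_cases hr : b + 1 < below.length
    · rw [List.getElem_append_left (by simpa using (by omega : b < below.length - 1))]
      simpa [List.getElem_drop] using (List.getD_eq_getElem below 0 hr).symm
    · rw [List.getElem_append_right (by simpa using (by omega : ¬ b < below.length - 1))]
      simpa using (List.getD_eq_default below 0 (by omega : below.length ≤ b + 1)).symm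
  rw [hleft, hright]

lemma getD_T_at (a : Nat) (z x : List Int) (rest : List (List Int)) :
    (List.replicate a z ++ x :: rest).getD a [] = x := by
  simp [List.getD]

lemma getD_T_succ (a : Nat) (z x : List Int) (rest : List (List Int)) :
    (List.replicate a z ++ x :: rest).getD (a+1) [] = rest.getD 0 [] := by
  simp [List.getD, List.getElem?_append_right (by simp : (List.replicate a z).length ≤ a + 1)]

lemma set_T (a : Nat) (z x row : List Int) (rest : List (List Int)) :
    (List.replicate a z ++ x :: rest).set a row = List.replicate a z ++ row :: rest := by
  rw [List.set_append]
  simp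

lemma getD_zr (n : Int) (k : Nat) : (zr n).getD k 0 = 0 := by
  simp [zr, List.getD, List.getElem?_replicate]
  split <;> rfl

lemma innerAux (m n : Int) (grid : List (List Int)) (i : Nat) (acc : List (List Int)) (below : List Int)
    (hn : 0 < n)
    (higrid : i < grid.length)
    (hg : n.toNat ≤ (grid.getD i []).length)
    (hb : below.length = n.toNat)
    (hcase : ((i:Int) = m - 1 ∧ below = zr n) ∨ ((i:Int) < m - 1 ∧ acc.getD 0 [] = below))
    (b : Nat) (hbn : b ≤ n.toNat) :
    (PySem.List.pyRange 0 (b:Int) 1).foldl (stepAin m n grid (i:Int)) (List.replicate (i+1) (zr n) ++ acc)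
      = List.replicate i (zr n) ++
        (((compRow (grid.getD i []) below).take b ++ List.replicate (n.toNat - b) 0) :: acc) := by
  have hNR : (compRow (grid.getD i []) below).length = n.toNat := by
    rw [length_compRow, hb]; omega
  induction b with
  | zero =>
      rw [PySem.List.pyRange_one_eq_nil (by omega)]
      simp [List.replicate_succ' (n := i), zr]
  | succ b ih =>
      have hble : b ≤ n.toNat := by omega
      have hcast : ((b+1 : Nat) : Int) = (b : Int) + 1 := by push_cast; ring
      rw [hcast, PySem.List.pyRange_one_succ_right (by positivity), List.foldl_append]
      rw [ih hble]
      have hgb : b < (grid.getD i []).length := by omega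
      have hgi' : grid.getD i [] = grid[i] := List.getD_eq_getElem _ _ higrid
      have hgb' : b < grid[i].length := hgi' ▸ hgb
      have hread : ((PySem.List.pyGet? grid (i:Int)).bind (fun r => PySem.List.pyGet? r (b:Int)))
          = some ((grid.getD i []).getD b 0) := by
        rw [hgi']
        simp [PySem.List.pyGet?_natCast, List.getElem?_eq_getElem higrid,
          List.getElem?_eq_getElem hgb']
      set newRow := compRow (grid.getD i []) below with hnewRow
      have hblt : b < newRow.length := by omega
      have htake : newRow.take (b+1) = newRow.take b ++ [newRow.getD b 0] := by
        rw [List.take_add_one, List.getElem?_eq_getElem hblt]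
        simp [List.getD, List.getElem?_eq_getElem hblt]
      have hrep : List.replicate (n.toNat - b) (0:Int) = 0 :: List.replicate (n.toNat - (b+1)) 0 := by
        have h : n.toNat - b = (n.toNat - (b+1)) + 1 := by omega
        rw [h, List.replicate_succ]
      have hpblen : (newRow.take b).length = b := by simp; omega
      have hval : newRow.getD b 0 =
          if (grid.getD i []).getD b 0 = 1 then
            1 + min (if b = 0 then 0 else below.getD (b-1) 0)
                (min (below.getD b 0) (below.getD (b+1) 0))
          else 0 := getD_compRow _ _ _ hgb (by omega)
      have hsetcell : ∀ v : Int,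
          pvSetCell (List.replicate i (zr n) ++ (newRow.take b ++ List.replicate (n.toNat - b) 0) :: acc) (i:Int) (b:Int) v
            = List.replicate i (zr n) ++ ((newRow.take b ++ (v :: List.replicate (n.toNat - (b+1)) 0)) :: acc) := by
        intro v
        simp only [pvSetCell, Int.toNat_natCast]
        rw [getD_T_at, set_T]
        congr 2
        rw [List.set_append, hpblen]
        simp [hrep]
      simp only [List.foldl_cons, List.foldl_nil, stepAin, hread, Option.some_inj]
      by_cases hone : (grid.getD i []).getD b 0 = 1
      · rw [if_pos hone]
        rcases hcase with ⟨him, hbz⟩ | ⟨him, hacc⟩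
        · rw [if_pos him, hsetcell 1]
          have hv1 : newRow.getD b 0 = 1 := by
            rw [hval, if_pos hone, hbz]
            simp only [getD_zr]
            simp
          rw [htake, hv1]
          simp
        · have hne : ¬ ((i:Int) = m - 1) := by omega
          have hTgetD : ∀ (j' : Int),
              pvGetCell (List.replicate i (zr n) ++ (newRow.take b ++ List.replicate (n.toNat - b) 0) :: acc) ((i:Int)+1) j'
                = below.getD j'.toNat 0 := by
            intro j'
            simp only [pvGetCell]
            have h1 : ((i:Int)+1).toNat = i + 1 := by omega
            rw [h1, getD_T_succ, hacc]
          rw [if_neg hne]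
          simp only [hTgetD]
          rw [hsetcell, htake]
          have hscal : newRow.getD b 0 =
              1 + min (if (b:Int) - 1 ≥ 0 then below.getD ((b:Int)-1).toNat 0 else 0)
                  (min (below.getD (b:Int).toNat 0)
                    (if (b:Int) + 1 < n then below.getD ((b:Int)+1).toNat 0 else 0)) := by
            have t1 : ((b:Int) - 1).toNat = b - 1 := by omega
            have t2 : ((b:Int) + 1).toNat = b + 1 := by omega
            have t0 : ((b:Int)).toNat = b := by omega
            rw [hval, if_pos hone, t1, t2, t0]
            congr 1
            congr 1
            · by_cases hb0 : b = 0
              · subst hb0; simp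
              · rw [if_neg hb0, if_pos (by omega : (b:Int) - 1 ≥ 0)]
            · congr 1
              by_cases hr : (b:Int) + 1 < n
              · rw [if_pos hr]
              · rw [if_neg hr, List.getD_eq_default _ _ (by omega : below.length ≤ b + 1)]
          rw [← hscal]
          simp
      · rw [if_neg hone]
        have hv0 : newRow.getD b 0 = 0 := by rw [hval, if_neg hone]
        rw [hrep, htake, hv0]
        simp

lemma outerAux (m n : Int) (grid : List (List Int))
    (hlen : 0 < n → m.toNat ≤ grid.length)
    (hrows : 0 < n → ∀ i : Nat, i < m.toNat → n ≤ ((grid.getD i []).length : Int)) :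
    ∀ (a : Nat), (a:Int) ≤ m → ∀ (accB : List (List Int)) (below : List Int),
      below.length = n.toNat →
      ((((a:Int) = m) ∧ accB = [] ∧ below = zr n) ∨ (((a:Int) < m) ∧ accB.getLast? = some below)) →
      (PySem.List.pyRange ((a:Int)-1) (-1) (-1)).foldl (stepA m n grid) (List.replicate a (zr n) ++ accB.reverse)
        = ((PySem.List.pyRange ((a:Int)-1) (-1) (-1)).foldl (stepB grid) (accB, below)).1.reverse := by
  intro a
  induction a with
  | zero =>
      intro _ accB below _ _
      rw [PySem.List.pyRange_neg_one_eq_nil (by norm_num)]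
      simp
  | succ a ih =>
      intro ha accB below hb hcase
      have hcons : PySem.List.pyRange (((a+1:Nat):Int)-1) (-1) (-1)
          = (a:Int) :: PySem.List.pyRange ((a:Int)-1) (-1) (-1) := by
        have h : ((a+1:Nat):Int) - 1 = (a:Int) := by push_cast; ring
        rw [h, PySem.List.pyRange_neg_one_cons (by omega : (-1:Int) < (a:Int))]
      have ham : (a:Int) < m := by push_cast at ha; omega
      set g' := (PySem.List.pyGet? grid (a:Int)).getD [] with hg'
      set cur := compRow g' below with hcur
      have hcurlen : cur.length = n.toNat := by
        by_cases hn : 0 < n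
        · have hag : a < grid.length := by
            have := hlen hn; omega
          have hgg : g' = grid.getD a [] := by
            simp [hg', PySem.List.pyGet?_natCast, List.getElem?_eq_getElem hag]
          have := hrows hn a (by omega)
          rw [hcur, length_compRow, hb, hgg]
          omega
        · rw [hcur, length_compRow, hb]
          omega
      have hstepB : stepB grid (accB, below) (a:Int) = (accB ++ [cur], cur) := rfl
      have hstepA : stepA m n grid (List.replicate (a+1) (zr n) ++ accB.reverse) (a:Int)
          = List.replicate a (zr n) ++ (cur :: accB.reverse) := by
        by_cases hn : 0 < n
        · have hag : a < grid.length := by have := hlen hn; omega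
          have hgg : grid.getD a [] = g' := by
            simp [hg', PySem.List.pyGet?_natCast, List.getElem?_eq_getElem hag]
          have hnn : ((n.toNat:Nat):Int) = n := Int.toNat_of_nonneg (by omega)
          have hcaseI : ((a:Int) = m - 1 ∧ below = zr n) ∨
              ((a:Int) < m - 1 ∧ accB.reverse.getD 0 [] = below) := by
            rcases hcase with ⟨h1, _, h3⟩ | ⟨h1, h2⟩
            · exact Or.inl ⟨by omega, h3⟩
            · refine Or.inr ⟨by omega, ?_⟩
              show (accB.reverse[0]?).getD [] = below
              rw [← List.head?_eq_getElem?, List.head?_reverse, h2]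
              rfl
          have hinner := innerAux m n grid a accB.reverse below hn hag
            (by have := hrows hn a (by omega); omega) hb hcaseI n.toNat (le_refl _)
          unfold stepA
          rw [show PySem.List.pyRange 0 n 1 = PySem.List.pyRange 0 ((n.toNat:Nat):Int) 1 from by rw [hnn]]
          rw [hinner, hgg, ← hcur]
          rw [List.take_of_length_le (by omega)]
          simp
        · have hznil : zr n = [] := by simp [zr]; omega
          have hcnil : cur = [] := List.eq_nil_of_length_eq_zero (by omega)
          unfold stepA
          rw [show (PySem.List.pyRange 0 n 1) = [] from PySem.List.pyRange_one_eq_nil (by omega)]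
          simp [List.replicate_succ' (n := a), hznil, hcnil]
      rw [hcons]
      simp only [List.foldl_cons]
      rw [hstepA, hstepB]
      have hrev : cur :: accB.reverse = (accB ++ [cur]).reverse := by simp
      rw [hrev]
      exact ih (by omega) (accB ++ [cur]) cur hcurlen
        (Or.inr ⟨ham, by simp⟩)

-- the rolling fold's rows are the Hh rows
lemma compRow_eq_map (m n : Int) (grid : List (List Int)) (hn : 0 < n) (i : Nat)
    (him : (i:Int) ≤ m - 1)
    (hig : i < grid.length) (hglen : n ≤ ((grid.getD i []).length : Int))
    (below : List Int) (hb : below.length = n.toNat)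
    (hbel : ((i:Int) = m - 1 ∧ below = zr n) ∨
            ((i:Int) < m - 1 ∧ below = (PySem.List.pyRange 0 n 1).map (Hh m n grid ((i:Int)+1)))) :
    compRow (grid.getD i []) below = (PySem.List.pyRange 0 n 1).map (Hh m n grid (i:Int)) := by
  have hglen' : n.toNat ≤ (grid.getD i []).length := by omega
  have hlenL : (compRow (grid.getD i []) below).length = n.toNat := by
    rw [length_compRow, hb]; omega
  have hlenR : ((PySem.List.pyRange 0 n 1).map (Hh m n grid (i:Int))).length = n.toNat := by
    simp [PySem.List.length_pyRange_one]
  apply List.ext_getElem (by rw [hlenL, hlenR])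
  intro b hb1 hb2
  have hbn : b < n.toNat := by omega
  have hgb : b < (grid.getD i []).length := by omega
  have hL : (compRow (grid.getD i []) below)[b] = (compRow (grid.getD i []) below).getD b 0 :=
    (List.getD_eq_getElem _ _ hb1).symm
  have hidx : (PySem.List.pyRange 0 n 1)[b]'(by simp [PySem.List.length_pyRange_one]; omega) = (b:Int) := by
    rw [PySem.List.getElem_pyRange_one]
    ring
  rw [hL, getD_compRow _ _ _ hgb (by omega), List.getElem_map, hidx]
  have hread : gA grid (i:Int) (b:Int) = some ((grid.getD i []).getD b 0) := by
    have hgi' : grid.getD i [] = grid[i] := List.getD_eq_getElem _ _ hig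
    have hgb' : b < grid[i].length := hgi' ▸ hgb
    rw [hgi']
    simp [gA, PySem.List.pyGet?_natCast, List.getElem?_eq_getElem hig,
      List.getElem?_eq_getElem hgb']
  rw [Hh_unfold m n grid (i:Int) (b:Int) him, hread]
  by_cases hone : (grid.getD i []).getD b 0 = 1
  · rw [if_pos hone, if_neg (not_not_intro (by rw [hone]))]
    rcases hbel with ⟨heq, hz⟩ | ⟨hlt, hmap⟩
    · rw [if_pos heq, hz]
      simp only [getD_zr]
      simp
    · rw [if_neg (show ¬ ((i:Int) = m - 1) by omega)]
      have hbelD : ∀ (t : Nat), t < n.toNat →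
          below.getD t 0 = Hh m n grid ((i:Int)+1) (t:Int) := by
        intro t ht
        rw [hmap]
        have hlt' : t < ((PySem.List.pyRange 0 n 1).map (Hh m n grid ((i:Int)+1))).length := by
          simp [PySem.List.length_pyRange_one]; omega
        rw [List.getD_eq_getElem _ _ hlt', List.getElem_map]
        congr 1
        rw [PySem.List.getElem_pyRange_one]
        ring
      congr 1
      congr 1
      · by_cases hb0 : b = 0
        · subst hb0
          norm_num
        · rw [if_neg hb0, if_pos (by omega : (b:Int) - 1 ≥ 0),
            hbelD (b-1) (by omega)]
          congr 1
          omega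
      · congr 1
        · exact hbelD b hbn
        · by_cases hr : (b:Int) + 1 < n
          · rw [if_pos hr, hbelD (b+1) (by omega)]
            push_cast
            ring_nf
          · rw [if_neg hr, List.getD_eq_default _ _ (by omega : below.length ≤ b + 1)]
  · rw [if_neg hone, if_pos (fun h => hone (Option.some.inj h))]

lemma rollAux (m n : Int) (grid : List (List Int))
    (hlen : 0 < n → m.toNat ≤ grid.length)
    (hrows : 0 < n → ∀ i : Nat, i < m.toNat → n ≤ ((grid.getD i []).length : Int)) :
    ∀ (a : Nat), (a:Int) ≤ m → ∀ (acc : List (List Int)) (below : List Int),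
      below.length = n.toNat →
      ((((a:Int) = m) ∧ below = zr n) ∨
       (((a:Int) < m) ∧ below = (PySem.List.pyRange 0 n 1).map (Hh m n grid (a:Int)))) →
      ((PySem.List.pyRange ((a:Int)-1) (-1) (-1)).foldl (stepB grid) (acc, below)).1
        = acc ++ ((List.range a).map
            (fun t => (PySem.List.pyRange 0 n 1).map (Hh m n grid (t:Int)))).reverse := by
  intro a
  induction a with
  | zero =>
      intro _ acc below _ _
      rw [PySem.List.pyRange_neg_one_eq_nil (by norm_num)]
      simp
  | succ a ih =>
      intro ha acc below hb hcase
      have hcons : PySem.List.pyRange (((a+1:Nat):Int)-1) (-1) (-1)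
          = (a:Int) :: PySem.List.pyRange ((a:Int)-1) (-1) (-1) := by
        have h : ((a+1:Nat):Int) - 1 = (a:Int) := by push_cast; ring
        rw [h, PySem.List.pyRange_neg_one_cons (by omega : (-1:Int) < (a:Int))]
      have ham : (a:Int) < m := by push_cast at ha; omega
      set g' := (PySem.List.pyGet? grid (a:Int)).getD [] with hg'
      set cur := compRow g' below with hcur
      have hcurmap : cur = (PySem.List.pyRange 0 n 1).map (Hh m n grid (a:Int)) := by
        by_cases hn : 0 < n
        · have hag : a < grid.length := by have := hlen hn; omega
          have hgg : g' = grid.getD a [] := by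
            simp [hg', PySem.List.pyGet?_natCast, List.getElem?_eq_getElem hag]
          have hbel : ((a:Int) = m - 1 ∧ below = zr n) ∨
              ((a:Int) < m - 1 ∧ below = (PySem.List.pyRange 0 n 1).map (Hh m n grid ((a:Int)+1))) := by
            rcases hcase with ⟨h1, h2⟩ | ⟨h1, h2⟩
            · exact Or.inl ⟨by omega, h2⟩
            · refine Or.inr ⟨by omega, ?_⟩
              simp only [h2, Nat.cast_add, Nat.cast_one]
          rw [hcur, hgg]
          exact compRow_eq_map m n grid hn a (by omega) hag (hrows hn a (by omega)) below hb hbel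
        · have hjs : PySem.List.pyRange 0 n 1 = [] := PySem.List.pyRange_one_eq_nil (by omega)
          have hbnil : below = [] := List.eq_nil_of_length_eq_zero (by omega)
          rw [hcur, hbnil, hjs]
          simp [compRow]
      have hcurlen : cur.length = n.toNat := by
        rw [hcurmap]
        simp [PySem.List.length_pyRange_one]
      have hstepB : stepB grid (acc, below) (a:Int) = (acc ++ [cur], cur) := rfl
      rw [hcons]
      simp only [List.foldl_cons]
      rw [hstepB]
      rw [ih (by omega) (acc ++ [cur]) cur hcurlen (Or.inr ⟨ham, hcurmap⟩)]
      rw [List.range_succ]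
      simp [hcurmap]

theorem pyramidHeights_main (m n : Int) (grid : List (List Int))
    (hpre : Pre_pyramidHeights m n grid) :
    pyramidHeights m n grid = pyramidHeights_alt m n grid := by
  have hlen : 0 < n → m.toNat ≤ grid.length := fun hn => (hpre hn).1
  have hrows : 0 < n → ∀ i : Nat, i < m.toNat → n ≤ ((grid.getD i []).length : Int) := by
    intro hn i hi
    have hig : i < grid.length := by have := hlen hn; omega
    have hmem : grid[i] ∈ grid.take m.toNat := by
      have hl : i < (grid.take m.toNat).length := by simp; omega
      have : (grid.take m.toNat)[i] = grid[i] := List.getElem_take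
      exact this ▸ List.getElem_mem hl
    have := (hpre hn).2 _ hmem
    rwa [List.getD_eq_getElem _ _ hig]
  rw [B_eq_target]
  by_cases hm : 0 < m
  · rw [A_eq_fold]
    have h0 : m - 1 = ((m.toNat:Nat):Int) - 1 := by omega
    rw [h0]
    have hroll := rollAux m n grid hlen hrows m.toNat (by omega) [] (zr n)
      (by simp [zr]) (Or.inl ⟨by omega, rfl⟩)
    have houter := outerAux m n grid hlen hrows m.toNat (by omega) [] (zr n)
      (by simp [zr]) (Or.inl ⟨by omega, rfl, rfl⟩)
    rw [show (List.replicate m.toNat (zr n) ++ ([] : List (List Int)).reverse)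
        = List.replicate m.toNat (zr n) from by simp] at houter
    rw [houter, hroll]
    apply List.ext_getElem
    · simp [PySem.List.length_pyRange_one]
    · intro t h1 h2
      simp [PySem.List.getElem_pyRange_one]
      intro a _ _
      congr 1
      have hmap : ∀ l : List Nat, List.flatMap (fun (a : Nat) => [((a : Nat) : Int)]) l
          = l.map (fun (a : Nat) => ((a : Nat) : Int)) := by
        intro l
        induction l with
        | nil => rfl
        | cons x xs ih => simp [List.flatMap_cons, ih]
      simp only [hmap, List.getElem_map, List.getElem_range]
  · rw [A_eq_fold, PySem.List.pyRange_neg_one_eq_nil (by omega : m - 1 ≤ -1)]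
    rw [PySem.List.pyRange_one_eq_nil (by omega : m ≤ 0)]
    have h0 : m.toNat = 0 := by omega
    simp [h0]

-- ===== VERDICT (by name: the statement is the Claim_ definition above) =====
theorem pyramidHeights_spec : Claim_equal_pyramidHeights := by
  intro m n grid _ hpre
  exact pyramidHeights_main m n grid hpre
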